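-- pv_equiv track=rewrite | github.com/Rishi6353/SCT_CS_2 | imagecrypt.py | modinv_256
-- ===== SOURCE A (Python) =====
-- def modinv_256(a: int) -> int:
--     # Only odd a have inverses modulo 256
--     if a % 2 == 0:
--         raise ValueError("mul:N requires N to be odd to be invertible modulo 256")
--     # Since 256 = 2^8, for odd a, inverse exists. Use extended Euclid on modulus 256.
--     t, new_t = 0, 1
--     r, new_r = 256, a % 256
--     while new_r != 0:
--         q = r // new_r
--         t, new_t = new_t, t - q * new_t
--         r, new_r = new_r, r - q * new_r
--     if r > 1:
--         raise ValueError("mul:N is not invertible modulo 256")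
--     if t < 0:
--         t += 256
--     return t
-- ===== SOURCE B (Python) =====
-- def modinv_256(a: int) -> int:
--     # Only odd a have inverses modulo 256
--     if a % 2 == 0:
--         raise ValueError("mul:N requires N to be odd to be invertible modulo 256")
--     # Hensel/Newton lifting: inv correct mod 2, each step doubles the bits (2->4->8),
--     # so three iterations give the inverse mod 2^8.
--     inv = 1
--     for _ in range(3):
--         inv = (inv * (2 - a * inv)) % 256
--     return inv % 256
-- ===== Notes on version B (the rewrite author's own statement) =====
-- stated objective: simpler
-- what changed: Replaces the extended-Euclid while loop (four variables, two raise sites, sign fixup) by three Hensel/Newton lifting steps inv = (inv*(2-a*inv)) % 256, a branch-free fixed-count computation.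
import Mathlib
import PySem

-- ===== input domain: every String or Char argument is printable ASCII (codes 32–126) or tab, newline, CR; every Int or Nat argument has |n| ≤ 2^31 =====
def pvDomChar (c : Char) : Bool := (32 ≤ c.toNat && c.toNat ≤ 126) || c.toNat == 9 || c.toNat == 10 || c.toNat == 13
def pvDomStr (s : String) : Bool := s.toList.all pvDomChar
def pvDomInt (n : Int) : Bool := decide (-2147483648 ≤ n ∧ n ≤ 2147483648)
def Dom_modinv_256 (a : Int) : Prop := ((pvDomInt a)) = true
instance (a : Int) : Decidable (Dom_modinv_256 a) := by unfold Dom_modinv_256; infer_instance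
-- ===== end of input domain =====

-- B replaces A's extended-Euclid loop by three Hensel/Newton lifting steps modulo 256 (simpler, branch-free, fixed iteration count); Pre_ excludes even a, on which A raises ValueError.


-- ===== PORT A =====
-- A's 'while new_r != 0' loop; the fuel only makes the recursion total — the
-- initial new_r is a % 256 ∈ [0,256) and strictly decreases, so 20 steps always suffice.
def modinvLoopA : Nat → Int → Int → Int → Int → Int × Int
  | 0, t, _, r, _ => (t, r)
  | fuel + 1, t, newt, r, newr =>
    if newr ≠ 0 then
      let q := PySem.Int.floordiv r newr
      modinvLoopA fuel newt (t - q * newt) newr (r - q * newr)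
    else (t, r)

def modinv_256 (a : Int) : Int :=
  if PySem.Int.mod a 2 = 0 then 0  -- Python raises ValueError here; excluded by Pre_
  else
    let p := modinvLoopA 20 0 1 256 (PySem.Int.mod a 256)
    if p.2 > 1 then 0  -- Python's (unreachable for odd a) second raise; excluded by Pre_
    else if p.1 < 0 then p.1 + 256 else p.1

-- ===== PORT B =====
-- one Hensel lifting step: inv = (inv * (2 - a * inv)) % 256
def henselStep (x inv : Int) : Int := PySem.Int.mod (inv * (2 - x * inv)) 256

def modinv_256_alt (a : Int) : Int :=
  if PySem.Int.mod a 2 = 0 then 0  -- B raises the identical ValueError here; excluded by Pre_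
  else PySem.Int.mod (henselStep a (henselStep a (henselStep a 1))) 256

-- ===== PRECONDITION & SPEC =====
-- Pre_ excludes exactly the even arguments, on which the Python A raises ValueError.
def Pre_modinv_256 (a : Int) : Prop := PySem.Int.mod a 2 ≠ 0
instance (a : Int) : Decidable (Pre_modinv_256 a) := by unfold Pre_modinv_256; infer_instance
def pvWitness_modinv_256 : Int := 7

def Spec_modinv_256 (a : Int) (out : Int) : Prop := out = modinv_256_alt a
instance (a : Int) (out : Int) : Decidable (Spec_modinv_256 a out) := by unfold Spec_modinv_256; infer_instance

-- ===== CLAIM (what is proved, stated in full; the proofs are below) =====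
def Claim_equal_modinv_256 : Prop := ∀ (a : Int), Dom_modinv_256 a → Pre_modinv_256 a → Spec_modinv_256 a (modinv_256 a)

-- ===== LEMMAS AND PROOFS =====

lemma pymod_pos (a b : Int) (hb : 0 < b) : PySem.Int.mod a b = a % b :=
  PySem.Int.mod_eq_emod_of_pos hb

lemma mod2_mod256 (a : Int) : PySem.Int.mod (a % 256) 2 = PySem.Int.mod a 2 := by
  rw [pymod_pos _ _ (by norm_num), pymod_pos _ _ (by norm_num),
    Int.emod_emod_of_dvd a (by norm_num)]

lemma mod256_mod256 (a : Int) : PySem.Int.mod (a % 256) 256 = PySem.Int.mod a 256 := by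
  rw [pymod_pos _ _ (by norm_num), pymod_pos _ _ (by norm_num),
    Int.emod_emod_of_dvd a dvd_rfl]

lemma henselStep_emod (x inv : Int) : henselStep (x % 256) inv = henselStep x inv := by
  have hx : Int.ModEq 256 (x % 256) x := Int.emod_emod_of_dvd x dvd_rfl
  have h : Int.ModEq 256 (inv * (2 - (x % 256) * inv)) (inv * (2 - x * inv)) :=
    ((Int.ModEq.refl 2).sub (hx.mul_right inv)).mul_left inv
  unfold henselStep
  rw [pymod_pos _ _ (by norm_num), pymod_pos _ _ (by norm_num)]
  exact h

lemma A_reduce (a : Int) : modinv_256 (a % 256) = modinv_256 a := by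
  unfold modinv_256
  rw [mod2_mod256, mod256_mod256]

lemma B_reduce (a : Int) : modinv_256_alt (a % 256) = modinv_256_alt a := by
  unfold modinv_256_alt
  rw [mod2_mod256]
  simp only [henselStep_emod]

set_option maxRecDepth 10000 in
lemma key : ∀ k : Fin 256, (k.val : Int) % 2 = 1 →
    modinv_256 (k.val : Int) = modinv_256_alt (k.val : Int) := by decide

-- ===== VERDICT (by name: the statement is the Claim_ definition above) =====
theorem modinv_256_spec : Claim_equal_modinv_256 := by
  intro a _ hpre
  unfold Spec_modinv_256
  have hpre' : a % 2 ≠ 0 := by rwa [Pre_modinv_256, pymod_pos _ _ (by norm_num)] at hpre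
  have hodd : a % 2 = 1 := by rcases Int.emod_two_eq a with h | h <;> omega
  have hr0 : 0 ≤ a % 256 := Int.emod_nonneg a (by norm_num)
  have hr1 : a % 256 < 256 := Int.emod_lt_of_pos a (by norm_num)
  have hk : (((a % 256).toNat : Nat) : Int) = a % 256 := Int.toNat_of_nonneg hr0
  have hkf : ((a % 256).toNat) < 256 := by omega
  have hko : (((a % 256).toNat : Nat) : Int) % 2 = 1 := by
    rw [hk, Int.emod_emod_of_dvd a (by norm_num), hodd]
  have := key ⟨(a % 256).toNat, hkf⟩ hko
  simp only [hk] at this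
  rw [A_reduce, B_reduce] at this
  exact this
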